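-- pv_equiv track=rewrite | github.com/pretensor-ai/pretensor | src/pretensor/intelligence/schema_classification.py | _shared_dimension_direct
-- ===== SOURCE A (Python) =====
-- def _shared_dimension_direct(
--     facts: set[str], dims: set[str], fk_pairs: list[tuple[str, str]]
-- ) -> dict[str, set[str]]:
--     """fact -> set of dimensions referenced by a direct FK from the fact."""
--     out: dict[str, set[str]] = {f: set() for f in facts}
--     for a, b in fk_pairs:
--         if a in facts and b in dims:
--             out.setdefault(a, set()).add(b)
--     return out
-- ===== SOURCE B (Python) =====
-- def _shared_dimension_direct(
--     facts: set[str], dims: set[str], fk_pairs: list[tuple[str, str]]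
-- ) -> dict[str, set[str]]:
--     """fact -> set of dimensions referenced by a direct FK from the fact."""
--     return {f: {b for a, b in fk_pairs if a == f and b in dims} for f in facts}
-- ===== Notes on version B (the rewrite author's own statement) =====
-- stated objective: simpler
-- what changed: Control flow is inverted: instead of pre-building a dict of empty sets and doing one grouping pass over fk_pairs that mutates it via setdefault, B is a single dict comprehension that, for each fact, rescans fk_pairs and collects the matching dimensions as a set comprehension.
import Mathlib
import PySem

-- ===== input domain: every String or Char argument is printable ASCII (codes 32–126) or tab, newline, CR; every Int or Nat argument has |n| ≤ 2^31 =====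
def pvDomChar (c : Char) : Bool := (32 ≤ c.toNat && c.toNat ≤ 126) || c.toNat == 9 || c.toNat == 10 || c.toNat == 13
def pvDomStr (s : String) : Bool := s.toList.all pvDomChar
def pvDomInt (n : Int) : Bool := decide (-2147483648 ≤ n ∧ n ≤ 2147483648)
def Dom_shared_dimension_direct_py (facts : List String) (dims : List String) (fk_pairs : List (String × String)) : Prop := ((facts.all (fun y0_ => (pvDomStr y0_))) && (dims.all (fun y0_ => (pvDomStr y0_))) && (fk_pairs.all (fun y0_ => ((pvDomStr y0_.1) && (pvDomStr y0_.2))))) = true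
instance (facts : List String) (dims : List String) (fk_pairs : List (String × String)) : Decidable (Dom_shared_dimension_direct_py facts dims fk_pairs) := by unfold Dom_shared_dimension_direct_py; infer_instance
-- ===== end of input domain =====

-- B replaces A's single grouping pass (dict of empty sets + setdefault-mutation) by a
-- dict comprehension that rescans fk_pairs once per fact (simpler; not faster).

-- ===== PORT A =====
-- out = {f: set() for f in facts}; for (a,b) in fk_pairs: if a in facts and b in dims: out.setdefault(a, set()).add(b)
def shared_dimension_direct_py (facts : List String) (dims : List String) (fk_pairs : List (String × String)) : List (String × List String) :=
  let out : PySem.Dict String (PySem.Set String) :=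
    facts.foldl (fun d f => d.insert f PySem.Set.empty) PySem.Dict.empty
  let out :=
    fk_pairs.foldl (fun d p =>
      if PySem.Set.contains facts p.1 && PySem.Set.contains dims p.2 then
        d.modify p.1 PySem.Set.empty (fun s => PySem.Set.add s p.2)   -- out.setdefault(a, set()).add(b)
      else d) out
  out.items

-- ===== PORT B =====
-- {f: {b for a, b in fk_pairs if a == f and b in dims} for f in facts}
def shared_dimension_direct_py_alt (facts : List String) (dims : List String) (fk_pairs : List (String × String)) : List (String × List String) :=
  (facts.foldl (fun d f =>
      d.insert f (PySem.Set.ofList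
        ((fk_pairs.filter (fun p => p.1 == f && PySem.Set.contains dims p.2)).map (·.2))))
    PySem.Dict.empty).items

-- ===== PRECONDITION & SPEC =====
def Spec_shared_dimension_direct_py (facts : List String) (dims : List String) (fk_pairs : List (String × String)) (out : List (String × List String)) : Prop := out = shared_dimension_direct_py_alt facts dims fk_pairs
instance (facts : List String) (dims : List String) (fk_pairs : List (String × String)) (out : List (String × List String)) : Decidable (Spec_shared_dimension_direct_py facts dims fk_pairs out) := by unfold Spec_shared_dimension_direct_py; infer_instance

-- ===== CLAIM (what is proved, stated in full; the proofs are below) =====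
def Claim_equal_shared_dimension_direct_py : Prop := ∀ (facts : List String) (dims : List String) (fk_pairs : List (String × String)), Dom_shared_dimension_direct_py facts dims fk_pairs → Spec_shared_dimension_direct_py facts dims fk_pairs (shared_dimension_direct_py facts dims fk_pairs)

-- ===== LEMMAS AND PROOFS =====

-- lookup in a dict built by inserting a value depending only on the key, over a key list
theorem getD_foldl_insert_val {ν : Type} (val : String → ν) (d0 : ν) :
    ∀ (fs : List String) (d : PySem.Dict String ν) (k : String),
      (fs.foldl (fun d f => d.insert f (val f)) d).getD k d0 =
        if k ∈ fs then val k else d.getD k d0 := by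
  intro fs
  induction fs with
  | nil => intro d k; simp
  | cons f fs ih =>
    intro d k
    simp only [List.foldl_cons, ih, List.mem_cons]
    by_cases hk : k ∈ fs
    · simp [hk]
    · by_cases he : k = f
      · subst he; simp [hk, PySem.Dict.getD_insert_self]
      · simp [hk, he, PySem.Dict.getD_insert_of_ne _ _ _ he]

-- keys of A's grouping pass do not change: every key the guard admits is already present
theorem keys_groupA (facts dims : List String) :
    ∀ (ps : List (String × String)) (d : PySem.Dict String (PySem.Set String)),
      (∀ x, PySem.Set.contains facts x = true → d.contains x = true) →
      (ps.foldl (fun d p =>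
          if PySem.Set.contains facts p.1 && PySem.Set.contains dims p.2 then
            d.modify p.1 PySem.Set.empty (fun s => PySem.Set.add s p.2)
          else d) d).keys = d.keys := by
  intro ps
  induction ps with
  | nil => intro d _; rfl
  | cons p ps ih =>
    intro d hd
    simp only [List.foldl_cons]
    by_cases hg : (PySem.Set.contains facts p.1 && PySem.Set.contains dims p.2) = true
    · rw [if_pos hg]
      have hc : d.contains p.1 = true := hd p.1 (by simpa using And.left (by simpa using hg))
      rw [ih _ (fun x hx => by simp [PySem.Dict.contains_modify, hd x hx])]
      rw [PySem.Dict.keys_modify, PySem.Dict.keys_insert_of_contains _ _ hc]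
    · rw [if_neg hg]; exact ih d hd

-- value at a fact key after A's grouping pass: the conditional adds over ps
theorem getD_groupA (facts dims : List String) (k : String)
    (hk : PySem.Set.contains facts k = true) :
    ∀ (ps : List (String × String)) (d : PySem.Dict String (PySem.Set String)),
      (ps.foldl (fun d p =>
          if PySem.Set.contains facts p.1 && PySem.Set.contains dims p.2 then
            d.modify p.1 PySem.Set.empty (fun s => PySem.Set.add s p.2)
          else d) d).getD k PySem.Set.empty =
        PySem.Set.update (d.getD k PySem.Set.empty)
          ((ps.filter (fun p => p.1 == k && PySem.Set.contains dims p.2)).map (·.2)) := by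
  intro ps
  induction ps with
  | nil => intro d; simp [PySem.Set.update]
  | cons p ps ih =>
    intro d
    simp only [List.foldl_cons, List.filter_cons]
    by_cases he : p.1 = k
    · subst he
      by_cases hb : PySem.Set.contains dims p.2 = true
      · have hg : (PySem.Set.contains facts p.1 && PySem.Set.contains dims p.2) = true := by
          rw [hk, hb]; rfl
        rw [if_pos hg]
        simp only [BEq.rfl, hb, Bool.and_self, if_pos, List.map_cons]
        rw [ih, PySem.Dict.getD_modify_self]
        rfl
      · have hb' : PySem.Set.contains dims p.2 = false := by
          simpa using hb
        rw [hb']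
        simp only [Bool.and_false, Bool.false_eq_true, if_false]
        exact ih d
    · have hfilt : (p.1 == k && PySem.Set.contains dims p.2) = false := by
        simp [he]
      rw [hfilt]
      simp only [Bool.false_eq_true, if_false]
      by_cases hg : (PySem.Set.contains facts p.1 && PySem.Set.contains dims p.2) = true
      · rw [if_pos hg, ih, PySem.Dict.getD_modify_of_ne]
        exact fun h => he h.symm
      · rw [if_neg hg]
        exact ih d

theorem shared_dimension_direct_py_eq (facts dims : List String) (fk_pairs : List (String × String)) :
    shared_dimension_direct_py facts dims fk_pairs = shared_dimension_direct_py_alt facts dims fk_pairs := by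
  unfold shared_dimension_direct_py shared_dimension_direct_py_alt
  set val : String → PySem.Set String := fun f =>
    PySem.Set.ofList ((fk_pairs.filter (fun p => p.1 == f && PySem.Set.contains dims p.2)).map (·.2))
    with hval
  set d0 : PySem.Dict String (PySem.Set String) :=
    facts.foldl (fun d f => d.insert f PySem.Set.empty) PySem.Dict.empty with hd0
  set dB : PySem.Dict String (PySem.Set String) :=
    facts.foldl (fun d f => d.insert f (val f)) PySem.Dict.empty with hdB
  set dA : PySem.Dict String (PySem.Set String) :=
    fk_pairs.foldl (fun d p =>
      if PySem.Set.contains facts p.1 && PySem.Set.contains dims p.2 then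
        d.modify p.1 PySem.Set.empty (fun s => PySem.Set.add s p.2)
      else d) d0 with hdA
  -- keys
  have hkeys0 : d0.keys = PySem.Set.ofList facts := by
    rw [hd0, PySem.Dict.keys_foldl_insert]
    simp [PySem.Set.update_nil_left]
  have hkeysB : dB.keys = PySem.Set.ofList facts := by
    rw [hdB, PySem.Dict.keys_foldl_insert]
    simp [PySem.Set.update_nil_left]
  have hcont0 : ∀ x, PySem.Set.contains facts x = true → d0.contains x = true := by
    intro x hx
    rw [PySem.Dict.contains_eq_decide_mem_keys, hkeys0]
    simp only [decide_eq_true_eq, PySem.Set.mem_ofList]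
    simpa [PySem.Set.contains_iff] using hx
  have hkeysA : dA.keys = PySem.Set.ofList facts := by
    rw [hdA, keys_groupA facts dims fk_pairs d0 hcont0, hkeys0]
  have hndA : dA.keys.Nodup := by rw [hkeysA]; exact PySem.Set.nodup_ofList facts
  have hndB : dB.keys.Nodup := by rw [hkeysB]; exact PySem.Set.nodup_ofList facts
  rw [PySem.Dict.items_eq_map_keys dA hndA PySem.Set.empty,
      PySem.Dict.items_eq_map_keys dB hndB PySem.Set.empty, hkeysA, hkeysB]
  apply List.map_congr_left
  intro k hkmem
  have hkf : k ∈ facts := (PySem.Set.mem_ofList facts k).1 hkmem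
  have hkc : PySem.Set.contains facts k = true := by
    simpa [PySem.Set.contains_iff] using hkf
  have h0 : d0.getD k PySem.Set.empty = PySem.Set.empty := by
    have h := getD_foldl_insert_val (fun _ : String => (PySem.Set.empty : PySem.Set String))
      PySem.Set.empty facts PySem.Dict.empty k
    simp only at h
    rw [hd0, h, if_pos hkf]
  have hA : dA.getD k PySem.Set.empty = val k := by
    rw [hdA, getD_groupA facts dims k hkc fk_pairs d0, h0, hval]
    exact PySem.Set.update_nil_left _
  have hB : dB.getD k PySem.Set.empty = val k := by
    rw [hdB, getD_foldl_insert_val val PySem.Set.empty facts PySem.Dict.empty k, if_pos hkf]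
  rw [hA, hB]

-- ===== VERDICT (by name: the statement is the Claim_ definition above) =====
theorem shared_dimension_direct_py_spec : Claim_equal_shared_dimension_direct_py := by
  intro facts dims fk_pairs _
  exact shared_dimension_direct_py_eq facts dims fk_pairs
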